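-- pv_equiv track=rewrite | github.com/Yaazhini25/omr-evaluation-system | omr_bubble_detection.py | group_bubbles_into_questions
-- ===== SOURCE A (Python) =====
-- def group_bubbles_into_questions(bubble_contours, choices_per_question=5):
--     """
--     Group bubbles into questions based on their positions
--     """
--     if not bubble_contours:
--         return []
--
--     questions = []
--     current_row_y = bubble_contours[0]['center_y']
--     current_question = []
--     row_threshold = 30  # Pixels tolerance for same row
--
--     for bubble in bubble_contours:
--         # If bubble is in roughly the same row
--         if abs(bubble['center_y'] - current_row_y) <= row_threshold:
--             current_question.append(bubble)
--         else:
--             # New row - save current question if it has the right number of choices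
--             if len(current_question) == choices_per_question:
--                 # Sort by x-coordinate within the question
--                 current_question.sort(key=lambda b: b['center_x'])
--                 questions.append(current_question)
--
--             # Start new question
--             current_question = [bubble]
--             current_row_y = bubble['center_y']
--
--     # Don't forget the last question
--     if len(current_question) == choices_per_question:
--         current_question.sort(key=lambda b: b['center_x'])
--         questions.append(current_question)
--
--     return questions
-- ===== SOURCE B (Python) =====
-- def group_bubbles_into_questions(bubble_contours, choices_per_question=5):
--     # Consume the list row by row: scan for the extent of the next row
--     # (relative to its first bubble's y), emit it if complete, slice it off.
--     questions = []
--     rest = bubble_contours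
--     while rest:
--         y0 = rest[0]['center_y']
--         i = 1
--         while i < len(rest) and abs(rest[i]['center_y'] - y0) <= 30:
--             i += 1
--         if i == choices_per_question:
--             questions.append(sorted(rest[:i], key=lambda b: b['center_x']))
--         rest = rest[i:]
--     return questions
-- ===== Notes on version B (the rewrite author's own statement) =====
-- stated objective: alternative
-- what changed: Replaces A's element-by-element fold with running current_question/current_row_y state by a row-at-a-time consumer: each outer step scans the extent of the next contiguous row, emits its sorted slice if complete, and slices it off the remaining list.
import Mathlib
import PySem

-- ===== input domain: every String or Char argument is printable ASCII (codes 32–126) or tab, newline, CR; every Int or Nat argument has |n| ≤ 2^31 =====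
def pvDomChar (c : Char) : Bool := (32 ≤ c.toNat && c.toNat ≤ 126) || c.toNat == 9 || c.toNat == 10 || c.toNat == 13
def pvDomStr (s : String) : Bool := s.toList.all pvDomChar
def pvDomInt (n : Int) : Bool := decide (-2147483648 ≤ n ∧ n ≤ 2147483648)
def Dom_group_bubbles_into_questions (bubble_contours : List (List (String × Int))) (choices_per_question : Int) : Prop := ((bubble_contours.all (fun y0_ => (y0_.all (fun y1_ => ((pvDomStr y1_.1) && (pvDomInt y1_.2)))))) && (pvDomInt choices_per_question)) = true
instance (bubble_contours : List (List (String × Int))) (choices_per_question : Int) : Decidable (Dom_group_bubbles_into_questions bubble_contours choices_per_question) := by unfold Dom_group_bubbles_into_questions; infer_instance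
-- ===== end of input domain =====

-- B replaces A's element-by-element fold (running current_question/current_row_y state)
-- by a row-at-a-time consumer that scans the extent of the next row and slices it off;
-- same return value, no speed claim.

-- Shared dict-access helpers (bubble['center_y'] / bubble['center_x']; total under Pre_)
def pvGetY (b : List (String × Int)) : Int := (List.lookup "center_y" b).getD 0
def pvGetX (b : List (String × Int)) : Int := (List.lookup "center_x" b).getD 0
-- sorted(row, key=lambda b: b['center_x'])  (Python's stable sort)
def pvSortX (q : List (List (String × Int))) : List (List (String × Int)) :=
  PySem.List.sorted q pvGetX

-- ===== PORT A =====
-- loop body of A, on state (questions, current_row_y, current_question)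
def pvStepA (k : Int)
    (st : List (List (List (String × Int))) × Int × List (List (String × Int)))
    (bubble : List (String × Int)) :
    List (List (List (String × Int))) × Int × List (List (String × Int)) :=
  if |pvGetY bubble - st.2.1| ≤ 30 then (st.1, st.2.1, st.2.2 ++ [bubble])
  else
    ((if (st.2.2.length : Int) = k then st.1 ++ [pvSortX st.2.2] else st.1),
     pvGetY bubble, [bubble])

def group_bubbles_into_questions (bubble_contours : List (List (String × Int))) (choices_per_question : Int) : List (List (List (String × Int))) :=
  match bubble_contours with
  | [] => []
  | b0 :: _ =>
    let st := bubble_contours.foldl (pvStepA choices_per_question) ([], pvGetY b0, [])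
    if (st.2.2.length : Int) = choices_per_question then st.1 ++ [pvSortX st.2.2] else st.1

-- ===== PORT B =====
-- B's outer while loop: take the next row (inner scan = takeWhile on the tail,
-- relative to the row's first bubble), append its sorted slice to questions if
-- complete, continue on the sliced-off remainder.
def pvGoB (k : Int) (questions : List (List (List (String × Int))))
    (rest : List (List (String × Int))) : List (List (List (String × Int))) :=
  match rest with
  | [] => questions
  | b0 :: tl =>
    let y0 := pvGetY b0
    let row := b0 :: tl.takeWhile (fun b => |pvGetY b - y0| ≤ 30)
    let rest' := tl.dropWhile (fun b => |pvGetY b - y0| ≤ 30)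
    pvGoB k (if (row.length : Int) = k then questions ++ [pvSortX row] else questions) rest'
termination_by rest.length
decreasing_by
  simpa [rest'] using Nat.lt_succ_of_le (tl.length_dropWhile_le _)

def group_bubbles_into_questions_alt (bubble_contours : List (List (String × Int))) (choices_per_question : Int) : List (List (List (String × Int))) :=
  pvGoB choices_per_question [] bubble_contours

-- ===== PRECONDITION & SPEC =====
-- Pre_ excludes the inputs on which A may raise KeyError: a bubble missing 'center_y',
-- or a bubble missing 'center_x' when a complete row can exist (1 ≤ k ≤ len); this still
-- excludes some inputs where A returns ('center_x' missing only in rows that are discarded).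
def Pre_group_bubbles_into_questions (bubble_contours : List (List (String × Int))) (choices_per_question : Int) : Prop :=
  (∀ b ∈ bubble_contours, (List.lookup "center_y" b).isSome = true) ∧
  ((∀ b ∈ bubble_contours, (List.lookup "center_x" b).isSome = true) ∨
    choices_per_question ≤ 0 ∨ (bubble_contours.length : Int) < choices_per_question)
instance (bubble_contours : List (List (String × Int))) (choices_per_question : Int) : Decidable (Pre_group_bubbles_into_questions bubble_contours choices_per_question) := by unfold Pre_group_bubbles_into_questions; infer_instance

def pvWitness_group_bubbles_into_questions : (List (List (String × Int))) × Int :=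
  ([[("center_y", 0), ("center_x", 7)], [("center_y", 5), ("center_x", 2)]], 2)

def Spec_group_bubbles_into_questions (bubble_contours : List (List (String × Int))) (choices_per_question : Int) (out : List (List (List (String × Int)))) : Prop := out = group_bubbles_into_questions_alt bubble_contours choices_per_question
instance (bubble_contours : List (List (String × Int))) (choices_per_question : Int) (out : List (List (List (String × Int)))) : Decidable (Spec_group_bubbles_into_questions bubble_contours choices_per_question out) := by unfold Spec_group_bubbles_into_questions; infer_instance

-- ===== CLAIM (what is proved, stated in full; the proofs are below) =====
def Claim_equal_group_bubbles_into_questions : Prop := ∀ (bubble_contours : List (List (String × Int))) (choices_per_question : Int), Dom_group_bubbles_into_questions bubble_contours choices_per_question → Pre_group_bubbles_into_questions bubble_contours choices_per_question → Spec_group_bubbles_into_questions bubble_contours choices_per_question (group_bubbles_into_questions bubble_contours choices_per_question)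

-- ===== LEMMAS AND PROOFS =====

-- pvGoB only appends to its accumulator
theorem pvGoB_acc (k : Int) (l : List (List (String × Int))) :
    ∀ acc, pvGoB k acc l = acc ++ pvGoB k [] l := by
  induction hn : l.length using Nat.strong_induction_on generalizing l with
  | _ n ih =>
    intro acc
    match l with
    | [] => simp [pvGoB]
    | b0 :: tl =>
      rw [pvGoB, pvGoB]
      have hlt : (tl.dropWhile (fun b => decide (|pvGetY b - pvGetY b0| ≤ 30))).length < n := by
        have := tl.length_dropWhile_le (fun b => decide (|pvGetY b - pvGetY b0| ≤ 30))
        simp at hn; omega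
      rw [ih _ hlt _ rfl, ih _ hlt _ rfl
        (acc := if (((b0 :: tl.takeWhile fun b => |pvGetY b - pvGetY b0| ≤ 30).length : Int) = k) then [] ++ [pvSortX _] else [])]
      by_cases h : (((tl.takeWhile fun b => |pvGetY b - pvGetY b0| ≤ 30).length : Int) + 1 = k) <;>
        simp [h]

-- A's trailing flush
def pvFinishA (k : Int)
    (st : List (List (List (String × Int))) × Int × List (List (String × Int))) :
    List (List (List (String × Int))) :=
  if (st.2.2.length : Int) = k then st.1 ++ [pvSortX st.2.2] else st.1

-- Invariant relating A's fold state to B's remaining computation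
theorem pv_main (k : Int) : ∀ (tl : List (List (String × Int)))
    (cur : List (List (String × Int))) (y0 : Int) (acc : List (List (List (String × Int)))),
    pvFinishA k (tl.foldl (pvStepA k) (acc, y0, cur))
    = (if (((cur ++ tl.takeWhile (fun b => |pvGetY b - y0| ≤ 30)).length : Int) = k)
        then acc ++ [pvSortX (cur ++ tl.takeWhile (fun b => |pvGetY b - y0| ≤ 30))] else acc)
      ++ pvGoB k [] (tl.dropWhile (fun b => |pvGetY b - y0| ≤ 30)) := by
  intro tl
  induction tl with
  | nil =>
    intro cur y0 acc
    by_cases h : ((cur.length : Int) = k) <;> simp [pvFinishA, pvGoB, h]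
  | cons b tl ih =>
    intro cur y0 acc
    simp only [List.foldl_cons]
    by_cases h : |pvGetY b - y0| ≤ 30
    · have hA : pvStepA k (acc, y0, cur) b = (acc, y0, cur ++ [b]) := by
        simp [pvStepA, h]
      rw [hA, ih (cur ++ [b]) y0 acc]
      simp [List.takeWhile, List.dropWhile, h]
    · have hA : pvStepA k (acc, y0, cur) b
          = ((if (cur.length : Int) = k then acc ++ [pvSortX cur] else acc), pvGetY b, [b]) := by
        simp [pvStepA, h]
      rw [hA, ih [b] (pvGetY b) _]
      have hgo : pvGoB k [] (b :: tl)
          = (if ((((tl.takeWhile (fun c => |pvGetY c - pvGetY b| ≤ 30)).length : Int) + 1) = k)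
              then [pvSortX (b :: tl.takeWhile (fun c => |pvGetY c - pvGetY b| ≤ 30))] else [])
            ++ pvGoB k [] (tl.dropWhile (fun c => |pvGetY c - pvGetY b| ≤ 30)) := by
        rw [pvGoB]
        conv_lhs => rw [pvGoB_acc]
        by_cases hr : ((((tl.takeWhile (fun c => |pvGetY c - pvGetY b| ≤ 30)).length : Int) + 1) = k) <;>
          simp [hr]
      simp only [List.takeWhile, List.dropWhile, h, decide_false]
      rw [hgo]
      by_cases hc : ((cur.length : Int) = k) <;>
        by_cases hr : ((((tl.takeWhile (fun c => |pvGetY c - pvGetY b| ≤ 30)).length : Int) + 1) = k) <;>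
          simp [hc, hr]

-- ===== VERDICT (by name: the statement is the Claim_ definition above) =====
theorem group_bubbles_into_questions_spec : Claim_equal_group_bubbles_into_questions := by
  unfold Claim_equal_group_bubbles_into_questions
  intro bs k _ _
  unfold Spec_group_bubbles_into_questions
  match bs with
  | [] => simp [group_bubbles_into_questions, group_bubbles_into_questions_alt, pvGoB]
  | b0 :: tl =>
    show group_bubbles_into_questions (b0 :: tl) k = group_bubbles_into_questions_alt (b0 :: tl) k
    unfold group_bubbles_into_questions group_bubbles_into_questions_alt
    simp only [List.foldl_cons]
    have hA : pvStepA k ([], pvGetY b0, []) b0 = ([], pvGetY b0, [b0]) := by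
      simp [pvStepA]
    rw [hA]
    have := pv_main k tl [b0] (pvGetY b0) []
    simp only [pvFinishA] at this
    rw [this, pvGoB]
    conv_rhs => rw [pvGoB_acc]
    by_cases hr : ((((tl.takeWhile (fun c => |pvGetY c - pvGetY b0| ≤ 30)).length : Int) + 1) = k) <;>
      simp [hr]
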